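-- pv_equiv track=rewrite | github.com/JinMinji/Algorithm_questions | Python/yogiyo_1.py | solution
-- ===== SOURCE A (Python) =====
-- def solution(S):
--     # write your code in Python 3.6
--     flag = True
--     if S[0] == 'b':
--         flag = False
--
--     answer = True
--     for i in range(1, len(S)):
--         if S[i] == 'a':
--             if not flag:
--                 answer = False
--                 break
--         else:
--             flag = False
--
--     return answer
-- ===== SOURCE B (Python) =====
-- def solution(S):
--     # phase 1: skip the allowed leading run (only when the first char is not b);
--     # phase 2: the tail must contain no further occurrence of the letter a
--     n = len(S)
--     i = 1
--     if S[0] != 'b':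
--         while i < n and S[i] == 'a':
--             i += 1
--     return 'a' not in S[i:]
-- ===== Notes on version B (the rewrite author's own statement) =====
-- stated objective: faster
-- what changed: Replaces the single-pass flag/break state machine with a two-phase scheme: skip the permitted leading run of the letter a (when the first char is not b), then a single substring membership test on the remaining tail decides the answer.
import Mathlib
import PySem

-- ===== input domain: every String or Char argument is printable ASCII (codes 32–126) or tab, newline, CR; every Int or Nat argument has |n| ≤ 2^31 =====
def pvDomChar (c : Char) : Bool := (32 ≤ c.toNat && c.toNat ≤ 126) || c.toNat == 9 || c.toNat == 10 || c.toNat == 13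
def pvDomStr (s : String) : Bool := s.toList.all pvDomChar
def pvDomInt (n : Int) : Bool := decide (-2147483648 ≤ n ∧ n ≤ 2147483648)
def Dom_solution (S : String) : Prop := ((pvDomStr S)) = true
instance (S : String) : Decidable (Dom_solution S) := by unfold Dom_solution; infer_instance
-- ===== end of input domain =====

-- B replaces A's flag/break state machine by a two-phase scan (skip the allowed leading
-- 'a'-run, then a substring membership test); same O(n) cost, equivalence of the return value.

-- ===== PORT A =====
-- loop body of A's 'for i in range(1, len(S))' over state (answer, flag);
-- the leading 'if st.1 = false then st' models the 'break'
def stepA (st : Bool × Bool) (ch : Char) : Bool × Bool :=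
  if st.1 = false then st
  else if ch = 'a' then (if st.2 then st else (false, st.2))
  else (st.1, false)

def solution (S : String) : Bool :=
  let flag : Bool :=
    match PySem.Str.pyGet? S 0 with
    | some c => if c = 'b' then false else true
    | none => true  -- Python raises IndexError here (S = "", excluded by Pre_)
  ((PySem.List.pyRange 1 (PySem.Str.len S) 1).foldl
      (fun st j => stepA st (PySem.List.pyGetD S.toList j ' ')) (true, flag)).1

-- ===== PORT B =====
-- 'while i < n and S[i] == 'a': i += 1' of Source B
def skipA (cs : List Char) (n : Int) (i : Int) : Int :=
  if i < n then
    if PySem.List.pyGetD cs i ' ' = 'a' then skipA cs n (i + 1) else i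
  else i
termination_by (n - i).toNat
decreasing_by omega

def solution_alt (S : String) : Bool :=
  let n : Int := PySem.Str.len S
  match PySem.Str.pyGet? S 0 with
  | none => true  -- Python raises IndexError here (S = "", excluded by Pre_)
  | some c =>
    let i : Int := if c ≠ 'b' then skipA S.toList n 1 else 1
    !(PySem.Str.isIn "a" (PySem.Str.slice S (some i) none))

-- ===== PRECONDITION & SPEC =====
-- A evaluates S[0] and raises IndexError on the empty string; Pre_ excludes exactly that input (B raises there too).
def Pre_solution (S : String) : Prop := S ≠ ""
instance (S : String) : Decidable (Pre_solution S) := by unfold Pre_solution; infer_instance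
def pvWitness_solution : String := "abc"

def Spec_solution (S : String) (out : Bool) : Prop := out = solution_alt S
instance (S : String) (out : Bool) : Decidable (Spec_solution S out) := by unfold Spec_solution; infer_instance

-- ===== CLAIM (what is proved, stated in full; the proofs are below) =====
def Claim_equal_solution : Prop := ∀ (S : String), Dom_solution S → Pre_solution S → Spec_solution S (solution S)

-- ===== LEMMAS AND PROOFS =====

-- once answer = false the loop state is frozen
lemma foldl_stepA_false (t : List Char) (fl : Bool) :
    List.foldl stepA (false, fl) t = (false, fl) := by
  induction t with
  | nil => rfl
  | cons ch t ih => simpa [stepA] using ih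

-- characterization of A's loop
lemma foldl_stepA_char (t : List Char) (fl : Bool) :
    (List.foldl stepA (true, fl) t).1 =
      if fl then !(t.dropWhile (· = 'a')).any (· = 'a') else !t.any (· = 'a') := by
  induction t generalizing fl with
  | nil => cases fl <;> simp
  | cons ch t ih =>
    by_cases hch : ch = 'a'
    · subst hch
      cases fl with
      | true => simpa [stepA, List.foldl_cons] using ih true
      | false => simp [stepA, List.foldl_cons, foldl_stepA_false]
    · cases fl <;> simp [stepA, hch, List.foldl_cons, ih false]

-- B's while loop skips exactly the leading 'a'-run
lemma skipA_spec (cs : List Char) (i : Nat) (h : i ≤ cs.length) :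
    skipA cs (cs.length : Int) (i : Int) =
      (i : Int) + ((cs.drop i).takeWhile (· = 'a')).length := by
  by_cases hlt : i < cs.length
  · rw [skipA]
    have hget : PySem.List.pyGetD cs (i : Int) ' ' = cs[i]'hlt := by
      simp [PySem.List.pyGetD_natCast, hlt]
    have hdrop : cs.drop i = cs[i]'hlt :: cs.drop (i + 1) :=
      (List.drop_eq_getElem_cons hlt)
    by_cases ha : cs[i]'hlt = 'a'
    · have := skipA_spec cs (i + 1) (by omega)
      rw [if_pos (by exact_mod_cast hlt), hget, if_pos ha]
      push_cast at this ⊢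
      rw [this, hdrop]
      simp [ha]
      omega
    · rw [if_pos (by exact_mod_cast hlt), hget, if_neg ha, hdrop]
      simp [ha]
  · have : i = cs.length := by omega
    subst this
    rw [skipA]
    simp
termination_by cs.length - i

lemma isIn_a_iff (l : List Char) :
    PySem.Chars.isIn ['a'] l = true ↔ 'a' ∈ l := by
  rw [PySem.Chars.isIn_iff_infix]
  constructor
  · intro hinf
    exact hinf.subset (by simp)
  · intro hm
    obtain ⟨s, t, rfl⟩ := List.append_of_mem hm
    exact ⟨s, t, by simp⟩

lemma any_a_eq (l : List Char) :
    (l.any (· = 'a')) = PySem.Chars.isIn ['a'] l := by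
  by_cases h : 'a' ∈ l
  · rw [(isIn_a_iff l).2 h]
    simp only [List.any_eq_true, decide_eq_true_eq]
    exact ⟨'a', h, rfl⟩
  · have h2 : PySem.Chars.isIn ['a'] l = false :=
      Bool.eq_false_iff.2 (fun hc => h ((isIn_a_iff l).1 hc))
    rw [h2]
    simp only [List.any_eq_false, decide_eq_true_eq]
    intro x hx hxa
    exact h (hxa ▸ hx)

-- ===== VERDICT (by name: the statement is the Claim_ definition above) =====
lemma drop_takeWhile_len (l : List Char) (p : Char → Bool) :
    l.drop (l.takeWhile p).length = l.dropWhile p := by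
  induction l with
  | nil => rfl
  | cons a l ih =>
    by_cases h : p a
    · simpa [h] using ih
    · simp [h]

theorem solution_spec : Claim_equal_solution := by
  intro S _ hpre
  unfold Spec_solution solution solution_alt
  obtain ⟨c, t, hS⟩ : ∃ c t, S.toList = c :: t := by
    cases h : S.toList with
    | nil =>
      exfalso
      exact hpre (by simpa [String.toList_eq_nil_iff] using h)
    | cons c t => exact ⟨c, t, rfl⟩
  have hget0 : PySem.Str.pyGet? S 0 = some c := by
    have := PySem.Str.pyGet?_natCast S 0
    simp only [Nat.cast_zero] at this
    rw [this, hS]; rfl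
  have hfold :
      (PySem.List.pyRange 1 (PySem.Str.len S) 1).foldl
          (fun st j => stepA st (PySem.List.pyGetD S.toList j ' ')) (true, (if c = 'b' then false else true)) =
        List.foldl stepA (true, (if c = 'b' then false else true)) t := by
    rw [PySem.Str.len_eq]
    rw [PySem.List.foldl_pyRange_pyGetD' S.toList ' ' stepA _ (by norm_num)]
    rw [hS]
    rfl
  have hskip : skipA S.toList (PySem.Str.len S) 1 =
      1 + ((t.takeWhile (· = 'a')).length : Int) := by
    have h1 : (1 : Nat) ≤ S.toList.length := by rw [hS]; simp
    have := skipA_spec S.toList 1 h1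
    rw [PySem.Str.len_eq]
    simpa [hS] using this
  have hslice : ∀ i : Int, 0 ≤ i →
      (PySem.Str.slice S (some i) none).toList = S.toList.drop i.toNat := by
    intro i hi
    rw [PySem.Str.toList_slice, PySem.Chars.slice_eq_listSlice,
      PySem.List.slice_from _ hi]
  have ha : ("a" : String).toList = ['a'] := rfl
  rw [hget0]
  dsimp only
  rw [hfold, foldl_stepA_char]
  by_cases hc : c = 'b'
  · rw [if_pos hc, if_neg (not_not_intro hc), if_neg (by simp)]
    rw [PySem.Str.isIn_eq, hslice 1 (by norm_num)]
    have h1 : S.toList.drop (1 : Int).toNat = t := by rw [hS]; rfl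
    rw [h1, ha, ← any_a_eq]
  · rw [if_neg hc, if_pos (by simp), if_pos (by exact hc)]
    rw [hskip]
    have h0 : (0 : Int) ≤ 1 + ((t.takeWhile (· = 'a')).length : Int) := by positivity
    rw [PySem.Str.isIn_eq, hslice _ h0]
    have htn : (1 + ((t.takeWhile (· = 'a')).length : Int)).toNat =
        (t.takeWhile (· = 'a')).length + 1 := by omega
    rw [htn, hS, List.drop_succ_cons, drop_takeWhile_len, ha, ← any_a_eq]
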